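-- pv_equiv track=rewrite | github.com/tuanngocfun/DNA_storage_locally_balance | M1_work/lb_check.py | is_locally_balanced
-- ===== SOURCE A (Python) =====
-- def is_locally_balanced(x: str, l: int, delta: int) -> bool:
--
--     # Check the (l, delta)-locally balanced constraint for a binary string x.
--     # Requires every consecutive substring of length l to have weight in
--     # [l/2 - delta, l/2 + delta]. (l must be even)
--
--     if l % 2 != 0:
--         raise ValueError("Window length l must be even.")
--     if any(c not in '01' for c in x):
--         return False
--
--     n = len(x)
--     low = l // 2 - delta
--     high = l // 2 + delta
--
--     if n < l:
--         wt = x.count('1')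
--         return low <= wt <= high
--
--     # Prefix sums for O(1) window weights
--     pref = [0] * (n + 1)
--     for i, ch in enumerate(x, 1):
--         pref[i] = pref[i - 1] + (1 if ch == '1' else 0)
--
--     for i in range(0, n - l + 1):
--         wt = pref[i + l] - pref[i]
--         if not (low <= wt <= high):
--             return False
--     return True
-- ===== SOURCE B (Python) =====
-- def is_locally_balanced(x: str, l: int, delta: int) -> bool:
--     if l % 2 != 0:
--         raise ValueError("Window length l must be even.")
--     if any(c not in '01' for c in x):
--         return False
--     n = len(x)
--     low = l // 2 - delta
--     high = l // 2 + delta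
--     if n < l:
--         wt = x.count('1')
--         return low <= wt <= high
--     # single rolling window counter; no prefix-sum table
--     wt = x[:l].count('1')
--     if not (low <= wt <= high):
--         return False
--     for i in range(l, n):
--         wt += (x[i] == '1') - (x[i - l] == '1')
--         if not (low <= wt <= high):
--             return False
--     return True
-- ===== Notes on version B (the rewrite author's own statement) =====
-- stated objective: alternative
-- what changed: Replaced A's two-phase prefix-sum table (build pref[0..n], then scan all windows as pref[i+l]-pref[i]) by a single-pass rolling window counter updated in place (subtract the leaving char, add the entering char) and checked as it slides, using O(1) extra space instead of an O(n) table.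
-- outside the precondition, e.g. on is_locally_balanced('01', -2, 0): A returns False, B returns False; on is_locally_balanced('0110', -2, 5): A raises IndexError, B raises IndexError
import Mathlib
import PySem

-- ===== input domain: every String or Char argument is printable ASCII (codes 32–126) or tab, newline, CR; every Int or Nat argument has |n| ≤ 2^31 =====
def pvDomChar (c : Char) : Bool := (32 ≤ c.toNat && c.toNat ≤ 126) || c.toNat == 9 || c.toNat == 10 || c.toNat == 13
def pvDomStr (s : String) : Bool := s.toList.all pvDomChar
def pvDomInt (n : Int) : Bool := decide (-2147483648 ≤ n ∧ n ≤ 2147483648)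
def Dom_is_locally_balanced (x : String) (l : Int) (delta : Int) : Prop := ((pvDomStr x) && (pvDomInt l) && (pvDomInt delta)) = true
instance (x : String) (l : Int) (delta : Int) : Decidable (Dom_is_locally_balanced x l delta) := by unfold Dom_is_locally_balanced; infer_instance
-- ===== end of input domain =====

-- B replaces A's prefix-sum table + window scan by a single rolling window counter
-- updated and checked in one pass (a different algorithm: O(1) extra space, no table).


-- ===== PORT A =====
def is_locally_balanced (x : String) (l : Int) (delta : Int) : Bool :=
  if PySem.Int.mod l 2 ≠ 0 then
    false  -- Python: raise ValueError (excluded by Pre_)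
  else if x.toList.any (fun c => c ≠ '0' && c ≠ '1') then  -- any(c not in '01' for c in x)
    false
  else
    let cs := x.toList
    let n : Int := cs.length
    let low := PySem.Int.floordiv l 2 - delta
    let high := PySem.Int.floordiv l 2 + delta
    if n < l then
      let wt : Int := PySem.List.count cs '1'
      decide (low ≤ wt ∧ wt ≤ high)
    else
      -- prefix-sum loop: pref[i] = pref[i-1] + (1 if ch == '1' else 0); kept as running value + reversed list
      let pref : List Int :=
        ((cs.foldl (fun (st : Int × List Int) ch =>
            (st.1 + (if ch = '1' then (1:Int) else 0),
             (st.1 + (if ch = '1' then (1:Int) else 0)) :: st.2)) ((0:Int), [(0:Int)])).2).reverse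
      -- for i in range(0, n - l + 1): early 'return False' ≡ short-circuiting all
      (PySem.List.pyRange 0 (n - l + 1) 1).all (fun i =>
        -- both indices are in range for every input admitted by Pre_ (0 ≤ l); getD 0 is unreachable there
        let wt := (PySem.List.pyGet? pref (i + l)).getD 0 - (PySem.List.pyGet? pref i).getD 0
        decide (low ≤ wt ∧ wt ≤ high))

-- ===== PORT B =====
-- the rolling loop: for i in range(l, n): wt += (x[i]=='1') - (x[i-l]=='1'); early exit on violation
def lbSlide (cs : List Char) (l low high : Int) : List Int → Int → Bool
  | [], _ => true
  | i :: rest, wt =>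
    let wt' := wt + (if (PySem.List.pyGet? cs i).getD ' ' = '1' then (1:Int) else 0)
                  - (if (PySem.List.pyGet? cs (i - l)).getD ' ' = '1' then (1:Int) else 0)
    if low ≤ wt' ∧ wt' ≤ high then lbSlide cs l low high rest wt' else false

def is_locally_balanced_alt (x : String) (l : Int) (delta : Int) : Bool :=
  if PySem.Int.mod l 2 ≠ 0 then
    false  -- Python: raise ValueError (excluded by Pre_)
  else if x.toList.any (fun c => c ≠ '0' && c ≠ '1') then
    false
  else
    let cs := x.toList
    let n : Int := cs.length
    let low := PySem.Int.floordiv l 2 - delta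
    let high := PySem.Int.floordiv l 2 + delta
    if n < l then
      let wt : Int := PySem.List.count cs '1'
      decide (low ≤ wt ∧ wt ≤ high)
    else
      let wt0 : Int := PySem.List.count (PySem.List.slice cs none (some l)) '1'  -- x[:l].count('1')
      if low ≤ wt0 ∧ wt0 ≤ high then
        lbSlide cs l low high (PySem.List.pyRange l n 1) wt0
      else false

-- ===== PRECONDITION & SPEC =====
-- Pre_ excludes odd l, on which A raises ValueError, and negative l on all-binary strings, where
-- A's window scan indexes the prefix array out of range (IndexError) or only returns a value through
-- Python's negative-index wraparound of that array — an accident of the prefix-array representation.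
def Pre_is_locally_balanced (x : String) (l : Int) (delta : Int) : Prop :=
  PySem.Int.mod l 2 = 0 ∧
    (0 ≤ l ∨ x.toList.any (fun c => c ≠ '0' && c ≠ '1') = true)
instance (x : String) (l : Int) (delta : Int) : Decidable (Pre_is_locally_balanced x l delta) := by
  unfold Pre_is_locally_balanced; infer_instance

def pvWitness_is_locally_balanced : String × Int × Int := ("0110", 2, 1)

def Spec_is_locally_balanced (x : String) (l : Int) (delta : Int) (out : Bool) : Prop := out = is_locally_balanced_alt x l delta
instance (x : String) (l : Int) (delta : Int) (out : Bool) : Decidable (Spec_is_locally_balanced x l delta out) := by unfold Spec_is_locally_balanced; infer_instance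

-- ===== CLAIM (what is proved, stated in full; the proofs are below) =====
def Claim_equal_is_locally_balanced : Prop := ∀ (x : String) (l : Int) (delta : Int), Dom_is_locally_balanced x l delta → Pre_is_locally_balanced x l delta → Spec_is_locally_balanced x l delta (is_locally_balanced x l delta)

-- ===== LEMMAS AND PROOFS =====

-- count of '1's as an Int
def pvCnt (cs : List Char) : Int := (cs.count '1' : Int)

-- weight of the window of length L starting at position k
def pvW (cs : List Char) (L k : Nat) : Int := pvCnt (cs.take (k + L)) - pvCnt (cs.take k)

theorem pv_all_congr_mem {α : Type} {l : List α} {p q : α → Bool}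
    (h : ∀ a ∈ l, p a = q a) : l.all p = l.all q := by
  induction l with
  | nil => rfl
  | cons a l ih => simp_all

theorem pvCnt_take_succ (cs : List Char) (m : Nat) (h : m < cs.length) :
    pvCnt (cs.take (m + 1)) = pvCnt (cs.take m) + (if cs[m] = '1' then (1:Int) else 0) := by
  simp only [pvCnt, List.take_add_one, List.getElem?_eq_getElem h, Option.toList_some,
    List.count_append, List.count_singleton]
  by_cases hc : cs[m] = '1' <;> simp [hc]

theorem pvW_succ (cs : List Char) (L k : Nat) (hk : k + L < cs.length) :
    pvW cs L (k + 1) = pvW cs L k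
      + (if cs[k + L]'hk = '1' then (1:Int) else 0)
      - (if cs[k]'(by omega) = '1' then (1:Int) else 0) := by
  have h1 : k + 1 + L = (k + L) + 1 := by omega
  simp only [pvW, h1, pvCnt_take_succ cs (k + L) hk, pvCnt_take_succ cs k (by omega)]
  ring

-- the prefix-sum fold produces exactly the list of prefix counts
theorem pref_fold (cs : List Char) (s : Int) (acc : List Int) :
    cs.foldl (fun (st : Int × List Int) ch =>
        (st.1 + (if ch = '1' then (1:Int) else 0),
         (st.1 + (if ch = '1' then (1:Int) else 0)) :: st.2)) (s, acc)
      = (s + pvCnt cs,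
         ((List.range cs.length).map (fun k => s + pvCnt (cs.take (k + 1)))).reverse ++ acc) := by
  induction cs generalizing s acc with
  | nil => simp [pvCnt]
  | cons c cs ih =>
    simp only [List.foldl_cons, ih]
    refine Prod.ext ?_ ?_
    · show (s + if c = '1' then (1:Int) else 0) + pvCnt cs = s + pvCnt (c :: cs)
      simp only [pvCnt, List.count_cons, beq_iff_eq]
      split_ifs <;> push_cast <;> ring
    · show _ ++ ((s + if c = '1' then (1:Int) else 0) :: acc) = _ ++ acc
      rw [List.length_cons, List.range_succ_eq_map]
      simp only [List.map_cons, List.map_map, List.reverse_cons, List.append_assoc,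
        List.singleton_append, List.take_succ_cons, List.take_zero]
      congr 1
      · congr 1
        refine List.map_congr_left ?_
        intro k _
        simp only [Function.comp_apply, List.take_succ_cons, pvCnt, List.count_cons, beq_iff_eq]
        split_ifs <;> push_cast <;> ring
      · congr 2
        simp only [pvCnt, List.count_cons, List.count_nil, beq_iff_eq]
        split_ifs <;> simp

theorem pref_eq (cs : List Char) :
    (((cs.foldl (fun (st : Int × List Int) ch =>
        (st.1 + (if ch = '1' then (1:Int) else 0),
         (st.1 + (if ch = '1' then (1:Int) else 0)) :: st.2)) ((0:Int), [(0:Int)])).2).reverse)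
      = (List.range (cs.length + 1)).map (fun k => pvCnt (cs.take k)) := by
  rw [pref_fold, List.range_succ_eq_map]
  simp [List.map_map, Function.comp, pvCnt]

-- the rolling loop computes the conjunction of the remaining window checks
theorem lbSlide_eq (cs : List Char) (low high : Int) (L : Nat) (m : Nat) :
    ∀ (k : Nat), k + m = cs.length - L → L ≤ cs.length →
    lbSlide cs (L : Int) low high (PySem.List.pyRange ((L : Int) + (k : Int)) (cs.length : Int) 1) (pvW cs L k)
      = (List.range m).all (fun j => decide (low ≤ pvW cs L (k + 1 + j) ∧ pvW cs L (k + 1 + j) ≤ high)) := by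
  induction m with
  | zero =>
    intro k hk hL
    have h1 : (cs.length : Int) ≤ (L : Int) + (k : Int) := by omega
    rw [PySem.List.pyRange_one_eq_nil h1]
    simp [lbSlide]
  | succ m ih =>
    intro k hk hL
    have hlt : (L : Int) + (k : Int) < (cs.length : Int) := by omega
    rw [PySem.List.pyRange_one_cons hlt]
    have hkL : k + L < cs.length := by omega
    have hk' : k < cs.length := by omega
    have hidx1 : (L : Int) + (k : Int) = ((k + L : Nat) : Int) := by push_cast; ring
    have hidx2 : ((k + L : Nat) : Int) - (L : Int) = ((k : Nat) : Int) := by push_cast; ring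
    simp only [lbSlide, hidx1]
    rw [hidx2]
    simp only [PySem.List.pyGet?_natCast,
      List.getElem?_eq_getElem hkL, List.getElem?_eq_getElem hk', Option.getD_some]
    rw [(pvW_succ cs L k hkL).symm]
    rw [List.range_succ_eq_map]
    simp only [List.all_cons, List.all_map]
    by_cases hchk : low ≤ pvW cs L (k + 1) ∧ pvW cs L (k + 1) ≤ high
    · rw [if_pos hchk]
      have h2 : ((k + L : Nat) : Int) + 1 = (L : Int) + ((k + 1 : Nat) : Int) := by push_cast; ring
      rw [h2, ih (k + 1) (by omega) hL]
      have hd : (decide (low ≤ pvW cs L (k + 1 + 0) ∧ pvW cs L (k + 1 + 0) ≤ high)) = true := by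
        simpa using hchk
      rw [hd, Bool.true_and]
      refine pv_all_congr_mem ?_
      intro j _
      simp only [Function.comp_apply, Nat.succ_eq_add_one]
      have he : k + 1 + 1 + j = k + 1 + (j + 1) := by omega
      rw [he]
    · rw [if_neg hchk]
      have hd : (decide (low ≤ pvW cs L (k + 1 + 0) ∧ pvW cs L (k + 1 + 0) ≤ high)) = false := by
        simpa using hchk
      rw [hd]
      simp

-- A's window scan over the prefix list equals the conjunction of all window checks
theorem scanA_eq (cs : List Char) (low high : Int) (L : Nat) (hL : L ≤ cs.length) :
    (PySem.List.pyRange 0 ((cs.length : Int) - (L : Int) + 1) 1).all (fun i =>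
        decide (low ≤ (PySem.List.pyGet? ((List.range (cs.length + 1)).map (fun k => pvCnt (cs.take k))) (i + (L : Int))).getD 0
                - (PySem.List.pyGet? ((List.range (cs.length + 1)).map (fun k => pvCnt (cs.take k))) i).getD 0
              ∧ (PySem.List.pyGet? ((List.range (cs.length + 1)).map (fun k => pvCnt (cs.take k))) (i + (L : Int))).getD 0
                - (PySem.List.pyGet? ((List.range (cs.length + 1)).map (fun k => pvCnt (cs.take k))) i).getD 0 ≤ high))
      = (List.range (cs.length - L + 1)).all
          (fun k => decide (low ≤ pvW cs L k ∧ pvW cs L k ≤ high)) := by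
  rw [PySem.List.pyRange_one, List.all_map]
  have hcast : ((cs.length : Int) - (L : Int) + 1 - 0).toNat = cs.length - L + 1 := by omega
  rw [hcast]
  refine pv_all_congr_mem ?_
  intro k hk
  have hk' : k < cs.length - L + 1 := List.mem_range.mp hk
  have h1 : (0 : Int) + (k : Int) + (L : Int) = ((k + L : Nat) : Int) := by push_cast; ring
  have h2 : (0 : Int) + (k : Int) = ((k : Nat) : Int) := by push_cast; ring
  simp only [Function.comp_apply]
  rw [h1, h2]
  simp only [PySem.List.pyGet?_natCast]
  rw [List.getElem?_map, List.getElem?_map,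
    List.getElem?_range (show k + L < cs.length + 1 by omega),
    List.getElem?_range (show k < cs.length + 1 by omega)]
  simp [pvW]

-- ===== VERDICT (by name: the statement is the Claim_ definition above) =====
theorem is_locally_balanced_spec : Claim_equal_is_locally_balanced := by
  intro x l delta _ hpre
  obtain ⟨heven, hrest⟩ := hpre
  unfold Spec_is_locally_balanced
  dsimp only [is_locally_balanced, is_locally_balanced_alt]
  rw [if_neg (not_not_intro heven), if_neg (not_not_intro heven)]
  by_cases hval : x.toList.any (fun c => c ≠ '0' && c ≠ '1') = true
  · rw [if_pos hval, if_pos hval]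
  · rw [if_neg hval, if_neg hval]
    have hl : 0 ≤ l := by
      rcases hrest with h | h
      · exact h
      · exact absurd h hval
    set cs := x.toList with hcs
    by_cases hnl : (cs.length : Int) < l
    · rw [if_pos hnl, if_pos hnl]
    · rw [if_neg hnl, if_neg hnl]
      set low := PySem.Int.floordiv l 2 - delta with hlow
      set high := PySem.Int.floordiv l 2 + delta with hhigh
      set L := l.toNat with hLdef
      have hlL : l = (L : Int) := by omega
      have hL : L ≤ cs.length := by omega
      rw [hlL]
      rw [pref_eq]
      rw [scanA_eq cs low high L hL]
      -- B side: the initial window weight is the weight of window 0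
      have hw0 : ((PySem.List.count (PySem.List.slice cs none (some ((L : Nat) : Int))) '1' : Nat) : Int) = pvW cs L 0 := by
        rw [PySem.List.slice_to_natCast]
        simp [PySem.List.count_eq, pvW, pvCnt]
      rw [hw0]
      have hslide := lbSlide_eq cs low high L (cs.length - L) 0 (by omega) hL
      have hz : (L : Int) + ((0 : Nat) : Int) = (L : Int) := by simp
      rw [hz] at hslide
      rw [hslide]
      -- combine: all checks over range (N-L+1) = check at 0 && all checks over the shifted range
      rw [List.range_succ_eq_map, List.all_cons, List.all_map]
      by_cases h0 : low ≤ pvW cs L 0 ∧ pvW cs L 0 ≤ high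
      · rw [if_pos h0]
        have hd : (decide (low ≤ pvW cs L 0 ∧ pvW cs L 0 ≤ high)) = true := by simp [h0]
        rw [hd, Bool.true_and]
        refine pv_all_congr_mem ?_
        intro j _
        simp only [Function.comp_apply, Nat.succ_eq_add_one,
          show (0:Nat) + 1 + j = j + 1 from by omega]
      · rw [if_neg h0]
        have hd : (decide (low ≤ pvW cs L 0 ∧ pvW cs L 0 ≤ high)) = false := by simpa using h0
        rw [hd, Bool.false_and]
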